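-- pv_equiv track=rewrite | github.com/tetapunto/CNN | CNNModel/file_creator.py | check_train_val_test
-- ===== SOURCE A (Python) =====
-- def check_train_val_test(filename):
--     if filename in ['data_batch_' + str(i) for i in range(1, 5)]:
--         key = 'train'
--     elif filename == 'data_batch_5':
--         key = 'val'
--     elif filename == 'test_batch':
--         key = 'test'
--     else:
--         key = None
--     return key
-- ===== SOURCE B (Python) =====
-- def check_train_val_test(filename):
--     prefix = 'data_batch_'
--     if filename.startswith(prefix) and len(filename) == len(prefix) + 1:
--         d = ord(filename[-1]) - ord('0')
--         if 1 <= d <= 4: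
--             return 'train'
--         if d == 5:
--             return 'val'
--         return None
--     return 'test' if filename == 'test_batch' else None
-- ===== Notes on version B (the rewrite author's own statement) =====
-- stated objective: alternative
-- what changed: Instead of A's if/elif chain that rebuilds a 4-element list comprehension and compares whole strings, B parses the filename structurally: prefix 'data_batch_' plus exactly one trailing character, whose digit value is classified arithmetically (1-4 train, 5 val), with 'test_batch' as the only other named case.
import Mathlib
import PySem

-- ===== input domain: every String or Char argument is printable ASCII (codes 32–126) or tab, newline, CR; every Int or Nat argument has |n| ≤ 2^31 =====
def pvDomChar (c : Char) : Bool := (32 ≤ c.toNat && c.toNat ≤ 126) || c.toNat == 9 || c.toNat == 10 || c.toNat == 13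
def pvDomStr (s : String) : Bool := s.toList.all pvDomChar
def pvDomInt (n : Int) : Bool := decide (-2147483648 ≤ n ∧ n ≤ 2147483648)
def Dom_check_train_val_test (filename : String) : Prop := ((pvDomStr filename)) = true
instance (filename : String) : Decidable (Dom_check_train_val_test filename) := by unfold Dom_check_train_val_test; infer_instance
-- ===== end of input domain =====

-- B replaces A's if/elif chain of whole-string comparisons by structural parsing: prefix
-- 'data_batch_' + one trailing character classified by its digit value; objective: alternative.

-- ===== PORT A =====
def check_train_val_test (filename : String) : Option String :=
  if filename ∈ (PySem.List.pyRange 1 5 1).map (fun i => "data_batch_" ++ PySem.Int.toStr i) then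
    some "train"
  else if filename = "data_batch_5" then
    some "val"
  else if filename = "test_batch" then
    some "test"
  else
    none

-- ===== PORT B =====
def check_train_val_test_alt (filename : String) : Option String :=
  let pfx := "data_batch_"
  if PySem.Str.startswith filename pfx
      && (PySem.Str.len filename == PySem.Str.len pfx + 1) then
    match PySem.Str.pyGet? filename (-1) with   -- filename[-1]; the guard makes it defined
    | none => none
    | some c =>
      let d : Int := (c.toNat : Int) - ('0'.toNat : Int)
      if 1 ≤ d ∧ d ≤ 4 then some "train"
      else if d = 5 then some "val"
      else none
  else if filename = "test_batch" then some "test"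
  else none

-- ===== PRECONDITION & SPEC =====
def Spec_check_train_val_test (filename : String) (out : Option String) : Prop := out = check_train_val_test_alt filename
instance (filename : String) (out : Option String) : Decidable (Spec_check_train_val_test filename out) := by unfold Spec_check_train_val_test; infer_instance

-- ===== CLAIM =====
def Claim_equal_check_train_val_test : Prop := ∀ (filename : String), Dom_check_train_val_test filename → Spec_check_train_val_test filename (check_train_val_test filename)

-- ===== LEMMAS AND PROOFS =====
theorem alt_eq_none (filename : String)
    (h1 : filename ≠ "data_batch_1") (h2 : filename ≠ "data_batch_2")
    (h3 : filename ≠ "data_batch_3") (h4 : filename ≠ "data_batch_4")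
    (h5 : filename ≠ "data_batch_5") (h6 : filename ≠ "test_batch") :
    check_train_val_test_alt filename = none := by
  show (if PySem.Str.startswith filename "data_batch_"
      && (PySem.Str.len filename == PySem.Str.len "data_batch_" + 1) then
    match PySem.Str.pyGet? filename (-1) with
    | none => none
    | some c =>
      let d : Int := (c.toNat : Int) - ('0'.toNat : Int)
      if 1 ≤ d ∧ d ≤ 4 then some "train"
      else if d = 5 then some "val"
      else none
  else if filename = "test_batch" then some "test"
  else (none : Option String)) = none

  by_cases hs : (PySem.Str.startswith filename "data_batch_"
      && (PySem.Str.len filename == PySem.Str.len "data_batch_" + 1)) = true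
  · rw [if_pos hs]
    simp only [Bool.and_eq_true, beq_iff_eq, PySem.Str.startswith_eq, PySem.Str.len_eq] at hs
    obtain ⟨hpre, hlen⟩ := hs
    rw [PySem.Chars.startswith_iff] at hpre
    obtain ⟨t, ht⟩ := hpre
    have hlen' : ("data_batch_".toList).length = 11 := by decide
    simp only [hlen'] at hlen
    have hlen12 : filename.toList.length = 12 := by omega
    obtain ⟨c, hc⟩ : ∃ c, t = [c] := by
      have htl : t.length = 1 := by
        have := congrArg List.length ht
        simp [hlen12] at this
        omega
      cases t with
      | nil => simp at htl
      | cons a t' => cases t' with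
        | nil => exact ⟨a, rfl⟩
        | cons b t'' => simp at htl
    subst hc
    have hget : PySem.Str.pyGet? filename (-1) = some c := by
      have h11 : filename.toList[11]? = some c := by
        rw [← ht]; simp
      rw [PySem.Str.pyGet?_eq, PySem.Chars.pyGet?_eq_listPyGet?,
        PySem.List.pyGet?_neg_ofNat filename.toList 1 (by omega) (by omega)]
      simpa [hlen12] using h11
    rw [hget]
    have h0 : ('0'.toNat : Int) = 48 := by decide
    simp only
    split_ifs with hd1 hd2
    · exfalso
      have hcn : c.toNat = 49 ∨ c.toNat = 50 ∨ c.toNat = 51 ∨ c.toNat = 52 := by omega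
      have hch : c = '1' ∨ c = '2' ∨ c = '3' ∨ c = '4' := by
        rcases hcn with h|h|h|h
        · exact Or.inl (Char.ext (UInt32.toNat_inj.mp (by simpa using h)))
        · exact Or.inr (Or.inl (Char.ext (UInt32.toNat_inj.mp (by simpa using h))))
        · exact Or.inr (Or.inr (Or.inl (Char.ext (UInt32.toNat_inj.mp (by simpa using h)))))
        · exact Or.inr (Or.inr (Or.inr (Char.ext (UInt32.toNat_inj.mp (by simpa using h)))))
      rcases hch with h|h|h|h <;> subst h
      · exact h1 (String.toList_inj.mp (by rw [← ht]; decide))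
      · exact h2 (String.toList_inj.mp (by rw [← ht]; decide))
      · exact h3 (String.toList_inj.mp (by rw [← ht]; decide))
      · exact h4 (String.toList_inj.mp (by rw [← ht]; decide))
    · exfalso
      have hcn : c.toNat = 53 := by omega
      have : c = '5' := Char.ext (UInt32.toNat_inj.mp (by simpa using hcn))
      subst this
      exact h5 (String.toList_inj.mp (by rw [← ht]; decide))
    · rfl
  · rw [if_neg hs, if_neg h6]

theorem a_eq_none (filename : String)
    (h1 : filename ≠ "data_batch_1") (h2 : filename ≠ "data_batch_2")
    (h3 : filename ≠ "data_batch_3") (h4 : filename ≠ "data_batch_4")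
    (h5 : filename ≠ "data_batch_5") (h6 : filename ≠ "test_batch") :
    check_train_val_test filename = none := by
  have hlist : (PySem.List.pyRange 1 5 1).map (fun i => "data_batch_" ++ PySem.Int.toStr i)
      = ["data_batch_1", "data_batch_2", "data_batch_3", "data_batch_4"] := by decide
  unfold check_train_val_test
  rw [hlist]
  simp [h1, h2, h3, h4, h5, h6]

theorem check_train_val_test_eq (filename : String) :
    check_train_val_test filename = check_train_val_test_alt filename := by
  by_cases e1 : filename = "data_batch_1"
  · subst e1; decide
  by_cases e2 : filename = "data_batch_2"
  · subst e2; decide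
  by_cases e3 : filename = "data_batch_3"
  · subst e3; decide
  by_cases e4 : filename = "data_batch_4"
  · subst e4; decide
  by_cases e5 : filename = "data_batch_5"
  · subst e5; decide
  by_cases e6 : filename = "test_batch"
  · subst e6; decide
  rw [a_eq_none filename e1 e2 e3 e4 e5 e6, alt_eq_none filename e1 e2 e3 e4 e5 e6]


-- ===== VERDICT =====
theorem check_train_val_test_spec : Claim_equal_check_train_val_test := by
  intro filename _
  unfold Spec_check_train_val_test
  exact check_train_val_test_eq filename
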